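-- pv_equiv track=rewrite | github.com/ed2k/streamlit-example | bridge/open_spiel_nn.py | str_to_bids
-- ===== SOURCE A (Python) =====
-- def str_to_bids(bids_str):
--   if len(bids_str) == 0:
--     return []
--   bids = []
--   i =  len(bids_str) - 1
--   seat_index = 3
--   while i >= 0:
--     if bids_str[i] in 'DR':
--       bids.insert(0, f'{seat_index}{bids_str[i]}:')
--     elif bids_str[i] != 'P':
--       bids.insert(0, f'{seat_index}:{bids_str[i]}')
--     else:
--       if all([b == 'P' for b in bids_str[:i+1]]):
--         bids.insert(0, f'{seat_index}:P')
--     seat_index = (seat_index - 1) % 4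
--     i -= 1
--
--   prev_bid = ''
--   i = 0
--   while i < len(bids):
--     current_bid = bids[i].split(':')[1]
--     if len(current_bid) == 0:
--       bids[i] += prev_bid
--     else:
--       prev_bid = current_bid
--     i += 1
--   return bids
-- ===== SOURCE B (Python) =====
-- def str_to_bids(bids_str):
--   # One forward pass: track the seat of the current character, the previous
--   # real bid (inherited by doubles/redoubles), and whether we are still in
--   # the leading run of passes.
--   seat = (4 - len(bids_str)) % 4
--   prev_bid = ''
--   leading = True
--   bids = []
--   for ch in bids_str:
--     if ch in 'DR':
--       bids.append(f'{seat}{ch}:{prev_bid}')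
--       leading = False
--     elif ch != 'P':
--       bids.append(f'{seat}:{ch}')
--       prev_bid = ch
--       leading = False
--     elif leading:
--       bids.append(f'{seat}:P')
--       prev_bid = 'P'
--     seat = (seat + 1) % 4
--   return bids
-- ===== Notes on version B (the rewrite author's own statement) =====
-- stated objective: faster
-- what changed: A's backward scan with insert-at-front and an O(i) all-'P' prefix rescan per pass, followed by a second fix-up pass that re-splits every token on ':', is replaced by a single forward pass that carries the seat counter, the previous bid and a leading-passes flag and emits each token directly.
-- outside the precondition, e.g. on str_to_bids('C:'): A returns ['2:C', '3::C'], B returns ['2:C', '3::']; on str_to_bids(':'): A returns ['3::'], B returns ['3::']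
import Mathlib
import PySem

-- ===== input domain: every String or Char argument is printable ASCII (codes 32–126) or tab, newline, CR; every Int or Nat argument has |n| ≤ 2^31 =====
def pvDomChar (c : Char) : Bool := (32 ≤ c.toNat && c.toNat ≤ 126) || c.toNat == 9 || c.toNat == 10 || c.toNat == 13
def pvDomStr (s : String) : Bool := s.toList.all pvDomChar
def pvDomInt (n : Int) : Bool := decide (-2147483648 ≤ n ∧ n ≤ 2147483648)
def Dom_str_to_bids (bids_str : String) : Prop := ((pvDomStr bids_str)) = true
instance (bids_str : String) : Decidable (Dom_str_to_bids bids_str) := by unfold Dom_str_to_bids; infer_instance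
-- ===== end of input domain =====

-- B replaces A's backward insert-at-front scan (with an O(n) all-'P' rescan per pass) plus a
-- second fix-up pass by a single forward pass carrying the seat, the previous bid and a
-- leading-passes flag (objective: simpler one-pass decomposition).

-- ===== PORT A =====
-- The body of Python's first while loop: one insertion (or none) at the front of bids.
def strToBidsStep (cs : List Char) (i : Nat) (seat : Int) (bids : List String) : List String :=
  let c := cs.getD i ' '   -- bids_str[i]; every call keeps i < cs.length
  if c = 'D' ∨ c = 'R' then (PySem.Int.toStr seat ++ String.ofList [c] ++ ":") :: bids
  else if c ≠ 'P' then (PySem.Int.toStr seat ++ ":" ++ String.ofList [c]) :: bids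
  else if (cs.take (i+1)).all (fun b => b == 'P') then (PySem.Int.toStr seat ++ ":P") :: bids
  else bids

-- Python's first while loop: i runs from len-1 down to 0.
def strToBidsScan (cs : List Char) : Nat → Int → List String → List String
  | 0, seat, bids => strToBidsStep cs 0 seat bids
  | j+1, seat, bids => strToBidsScan cs j (PySem.Int.mod (seat - 1) 4) (strToBidsStep cs (j+1) seat bids)

-- Python's second while loop over bids (in-place update becomes rebuilding the list).
def strToBidsFix (prev : String) : List String → List String
  | [] => []
  | b :: rest =>
    -- bids[i].split(':')[1]: ':' is a nonempty separator so split? = some, and every token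
    -- produced by the first loop contains ':', so index 1 exists in Python; getD is exact here.
    let cur := ((PySem.Str.split? b ":").getD []).getD 1 ""
    if PySem.Str.len cur = 0 then (b ++ prev) :: strToBidsFix prev rest
    else b :: strToBidsFix cur rest

def str_to_bids (bids_str : String) : List String :=
  let cs := bids_str.toList
  if cs.length = 0 then []
  else strToBidsFix "" (strToBidsScan cs (cs.length - 1) 3 [])

-- ===== PORT B =====
def strToBidsFwd : List Char → Int → String → Bool → List String
  | [], _, _, _ => []
  | c :: rest, seat, prev, leading =>
    if c = 'D' ∨ c = 'R' then
      (PySem.Int.toStr seat ++ String.ofList [c] ++ ":" ++ prev)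
        :: strToBidsFwd rest (PySem.Int.mod (seat + 1) 4) prev false
    else if c ≠ 'P' then
      (PySem.Int.toStr seat ++ ":" ++ String.ofList [c])
        :: strToBidsFwd rest (PySem.Int.mod (seat + 1) 4) (String.ofList [c]) false
    else if leading then
      (PySem.Int.toStr seat ++ ":P")
        :: strToBidsFwd rest (PySem.Int.mod (seat + 1) 4) "P" true
    else strToBidsFwd rest (PySem.Int.mod (seat + 1) 4) prev false

def str_to_bids_alt (bids_str : String) : List String :=
  strToBidsFwd bids_str.toList (PySem.Int.mod (4 - (bids_str.toList.length : Int)) 4) "" true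

-- ===== PRECONDITION & SPEC =====
-- Pre_ excludes strings containing ':', the separator of A's intermediate tokens: there A's
-- split-on-':' second pass reads a ':' bid as an empty field (a defensible corner of an
-- input that is not a bid encoding), while B reads the character itself.
def Pre_str_to_bids (bids_str : String) : Prop := ':' ∉ bids_str.toList
instance (bids_str : String) : Decidable (Pre_str_to_bids bids_str) := by unfold Pre_str_to_bids; infer_instance

def pvWitness_str_to_bids : String := "PP1CPDR"

def Spec_str_to_bids (bids_str : String) (out : List String) : Prop := out = str_to_bids_alt bids_str
instance (bids_str : String) (out : List String) : Decidable (Spec_str_to_bids bids_str out) := by unfold Spec_str_to_bids; infer_instance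

-- ===== CLAIM (what is proved, stated in full; the proofs are below) =====
def Claim_equal_str_to_bids : Prop := ∀ (bids_str : String), Dom_str_to_bids bids_str → Pre_str_to_bids bids_str → Spec_str_to_bids bids_str (str_to_bids bids_str)

-- ===== LEMMAS AND PROOFS =====

-- The token the first loop emits for character c at seat `seat`, with `lead` = "all characters
-- strictly before (and, at a 'P', including) this one are 'P'".
def pvTok (c : Char) (seat : Int) (lead : Bool) : List String :=
  if c = 'D' ∨ c = 'R' then [PySem.Int.toStr seat ++ String.ofList [c] ++ ":"]
  else if c ≠ 'P' then [PySem.Int.toStr seat ++ ":" ++ String.ofList [c]]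
  else if lead then [PySem.Int.toStr seat ++ ":P"] else []

-- A's first loop rewritten as a forward pass (proof-side characterisation).
def pvP1 : List Char → Int → Bool → List String
  | [], _, _ => []
  | c :: rest, seat, lead =>
    pvTok c seat lead ++ pvP1 rest (PySem.Int.mod (seat + 1) 4) (lead && (c == 'P'))

theorem pvMod4 (x : Int) : PySem.Int.mod x 4 = x % 4 := by
  simp [PySem.Int.mod, Int.fmod_eq_emod]

theorem scan_acc (cs : List Char) : ∀ (i : Nat) (seat : Int) (bids : List String),
    strToBidsScan cs i seat bids = strToBidsScan cs i seat [] ++ bids := by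
  intro i
  have hstep : ∀ (k : Nat) (seat : Int) (bids : List String),
      strToBidsStep cs k seat bids = strToBidsStep cs k seat [] ++ bids := by
    intro k seat bids
    unfold strToBidsStep
    by_cases h1 : cs.getD k ' ' = 'D' ∨ cs.getD k ' ' = 'R'
    · simp only [if_pos h1]; rfl
    · simp only [if_neg h1]
      by_cases h2 : cs.getD k ' ' = 'P'
      · have h2' : ¬ (cs.getD k ' ' ≠ 'P') := by simpa using h2
        simp only [if_neg h2']
        by_cases h3 : ((cs.take (k+1)).all fun b => b == 'P') = true
        · simp only [if_pos h3]; rfl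
        · simp only [if_neg h3]; rfl
      · simp only [if_pos h2]; rfl
  induction i with
  | zero =>
    intro seat bids
    simp only [strToBidsScan]
    exact hstep 0 seat bids
  | succ j ih =>
    intro seat bids
    simp only [strToBidsScan]
    rw [hstep, ih, ih _ (strToBidsStep cs (j+1) seat []), List.append_assoc]

theorem pvP1_snoc (l : List Char) (c : Char) : ∀ (s : Int), 0 ≤ s → s < 4 → ∀ (lead : Bool),
    pvP1 (l ++ [c]) s lead
      = pvP1 l s lead ++ pvTok c ((s + l.length) % 4) (lead && l.all (fun b => b == 'P')) := by
  induction l with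
  | nil =>
    intro s h0 h4 lead
    simp [pvP1, Int.emod_eq_of_lt h0 h4]
  | cons d l ih =>
    intro s h0 h4 lead
    have hb0 : 0 ≤ (s + 1) % 4 := Int.emod_nonneg _ (by norm_num)
    have hb4 : (s + 1) % 4 < 4 := Int.emod_lt_of_pos _ (by norm_num)
    simp only [List.cons_append, pvP1, pvMod4, ih _ hb0 hb4, List.append_assoc]
    have : ((s + 1) % 4 + (l.length : Int)) % 4 = (s + (d :: l).length) % 4 := by
      conv_lhs => rw [Int.add_emod, Int.emod_emod_of_dvd _ (by norm_num)]
      rw [← Int.add_emod]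
      simp only [List.length_cons]
      push_cast
      congr 1
      omega
    rw [this]
    simp [Bool.and_assoc]

theorem scan_eq_pvP1 (cs : List Char) : ∀ (i : Nat), i < cs.length → ∀ (seat : Int), 0 ≤ seat → seat < 4 →
    strToBidsScan cs i seat [] = pvP1 (cs.take (i+1)) ((seat - i) % 4) true := by
  intro i
  induction i with
  | zero =>
    intro hi seat h0 h4
    rcases cs with _ | ⟨a, t⟩
    · simp at hi
    · simp only [strToBidsScan, strToBidsStep, List.take_succ, List.take_zero]
      simp only [Nat.cast_zero, sub_zero, Int.emod_eq_of_lt h0 h4]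
      split_ifs <;> simp_all [pvP1, pvTok]
  | succ j ih =>
    intro hi seat h0 h4
    have hj : j < cs.length := by omega
    have hs'0 : (0:Int) ≤ (seat - 1) % 4 := Int.emod_nonneg _ (by norm_num)
    have hs'4 : (seat - 1) % 4 < 4 := Int.emod_lt_of_pos _ (by norm_num)
    have hq0 : (0:Int) ≤ (seat - (j+1)) % 4 := Int.emod_nonneg _ (by norm_num)
    have hq4 : (seat - (j+1)) % 4 < 4 := Int.emod_lt_of_pos _ (by norm_num)
    have hlen : (cs.take (j+1)).length = j+1 := by
      simp [List.length_take]; omega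
    have htake : cs.take (j+1+1) = cs.take (j+1) ++ [cs[j+1]] := by
      rw [List.take_succ]
      simp [List.getElem?_eq_getElem hi]
    calc strToBidsScan cs (j+1) seat []
        = strToBidsScan cs j ((seat-1) % 4) [] ++ strToBidsStep cs (j+1) seat [] := by
          simp only [strToBidsScan, pvMod4]
          rw [scan_acc]
      _ = pvP1 (cs.take (j+1)) ((seat - (j+1)) % 4) true ++ strToBidsStep cs (j+1) seat [] := by
          rw [ih hj _ hs'0 hs'4]
          congr 2
          conv_lhs => rw [Int.sub_emod, Int.emod_emod_of_dvd _ (by norm_num), ← Int.sub_emod]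
          congr 1
          ring
      _ = pvP1 (cs.take (j+1+1)) ((seat - (j+1)) % 4) true := by
          rw [htake, pvP1_snoc _ _ _ hq0 hq4, hlen]
          congr 1
          have hseat : ((seat - (j+1)) % 4 + ((j:Int)+1)) % 4 = seat := by
            conv_lhs => rw [Int.add_emod, Int.emod_emod_of_dvd _ (by norm_num), ← Int.add_emod]
            have : seat - (↑j + 1) + (↑j + 1) = seat := by ring
            rw [this, Int.emod_eq_of_lt h0 h4]
          -- the step token equals pvTok at the same seat; the lead flags agree whenever c = 'P'
          unfold strToBidsStep pvTok
          rw [List.getD_eq_getElem _ _ hi]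
          push_cast
          rw [hseat]
          split_ifs with h1 h2 h3 h4' h5 <;> simp_all
          · obtain ⟨x, hx, hxp⟩ := h4'
            have hsub : cs.take (j+1) ⊆ cs.take (j+1+1) := by
              intro y hy
              have heq : cs.take (j+1) = (cs.take (j+1+1)).take (j+1) := by
                rw [List.take_take, Nat.min_eq_left (by omega)]
              rw [heq] at hy
              exact List.take_subset _ _ hy
            exact hxp (h3 x (hsub hx))
          · obtain ⟨x, hx, hxp⟩ := h3
            rw [List.take_succ, List.getElem?_eq_getElem hi] at hx
            simp only [Option.toList_some] at hx
            rcases List.mem_append.1 hx with h | h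
            · exact hxp (h5 x h)
            · simp only [List.mem_singleton] at h
              exact hxp (h ▸ h2)

-- splitOn.go on a colon-free remainder: one final piece.
theorem pvGoFree : ∀ (l : List Char), ':' ∉ l → ∀ (fuel : Nat), l.length < fuel →
    ∀ (cur : List Char) (acc : List (List Char)),
    PySem.Chars.splitOn.go [':'] fuel l cur acc = acc.reverse ++ [cur.reverse ++ l] := by
  intro l
  induction l with
  | nil =>
    intro _ fuel hf cur acc
    obtain ⟨f, rfl⟩ : ∃ f, fuel = f + 1 := ⟨fuel - 1, by omega⟩
    simp [PySem.Chars.splitOn.go]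
  | cons c rest ih =>
    intro hl fuel hf cur acc
    obtain ⟨f, rfl⟩ : ∃ f, fuel = f + 1 := ⟨fuel - 1, by omega⟩
    have hcne : c ≠ ':' := fun h => hl (h ▸ List.mem_cons_self ..)
    have hc : ¬ [':'].isPrefixOf (c :: rest) = true := by
      simp [List.isPrefixOf]
      exact fun h => hcne h.symm
    simp only [PySem.Chars.splitOn.go]
    rw [if_neg hc]
    rw [ih (fun h => hl (List.mem_cons_of_mem _ h)) f (by simp at hf ⊢; omega)]
    simp

-- splitOn.go on a list with exactly one colon: two pieces.
theorem pvGoMid : ∀ (a : List Char), ':' ∉ a → ∀ (b : List Char), ':' ∉ b →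
    ∀ (fuel : Nat), a.length + b.length + 1 < fuel → ∀ (cur : List Char) (acc : List (List Char)),
    PySem.Chars.splitOn.go [':'] fuel (a ++ ':' :: b) cur acc
      = acc.reverse ++ [cur.reverse ++ a, b] := by
  intro a
  induction a with
  | nil =>
    intro _ b hb fuel hf cur acc
    obtain ⟨f, rfl⟩ : ∃ f, fuel = f + 1 := ⟨fuel - 1, by omega⟩
    have hc : [':'].isPrefixOf (':' :: b) = true := by simp [List.isPrefixOf]
    simp only [List.nil_append, PySem.Chars.splitOn.go]
    rw [if_pos hc]
    simp only [List.length_cons, List.length_nil, List.drop_succ_cons, List.drop_zero]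
    rw [pvGoFree b hb f (by simp only [List.length_nil] at hf; omega)]
    simp
  | cons c a' ih =>
    intro ha b hb fuel hf cur acc
    obtain ⟨f, rfl⟩ : ∃ f, fuel = f + 1 := ⟨fuel - 1, by omega⟩
    have hcne : c ≠ ':' := fun h => ha (h ▸ List.mem_cons_self ..)
    have hc : ¬ [':'].isPrefixOf (c :: (a' ++ ':' :: b)) = true := by
      simp [List.isPrefixOf]
      exact fun h => hcne h.symm
    simp only [List.cons_append, PySem.Chars.splitOn.go]
    rw [if_neg hc]
    rw [ih (fun h => ha (List.mem_cons_of_mem _ h)) b hb f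
      (by simp only [List.length_cons] at hf; omega)]
    simp

-- bids[i].split(':')[1] on a token "a:b" whose pieces are colon-free.
theorem pvSplitTok (t : String) (a b : List Char) (h : t.toList = a ++ ':' :: b)
    (ha : ':' ∉ a) (hb : ':' ∉ b) :
    ((PySem.Str.split? t ":").getD []).getD 1 "" = String.ofList b := by
  have hsep : (":" : String).toList = [':'] := by decide
  simp only [PySem.Str.split?, hsep, h, PySem.Chars.split?, List.isEmpty_cons,
    if_neg (by decide : ¬ (false = true)), PySem.Chars.splitOn]
  rw [pvGoMid a ha b hb _ (by simp only [List.length_append, List.length_cons]; omega)]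
  simp

theorem pvToStrNoColon (seat : Int) (h0 : 0 ≤ seat) (h4 : seat < 4) :
    ':' ∉ (PySem.Int.toStr seat).toList := by
  interval_cases seat <;> decide

theorem pvFixCons (prev b : String) (rest : List String) (cur : String)
    (hc : ((PySem.Str.split? b ":").getD []).getD 1 "" = cur) :
    strToBidsFix prev (b :: rest)
      = if PySem.Str.len cur = 0 then (b ++ prev) :: strToBidsFix prev rest
        else b :: strToBidsFix cur rest := by
  subst hc; rfl

theorem fix_pvP1 : ∀ (cs : List Char), ':' ∉ cs → ∀ (seat : Int), 0 ≤ seat → seat < 4 →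
    ∀ (prev : String) (lead : Bool),
    strToBidsFix prev (pvP1 cs seat lead) = strToBidsFwd cs seat prev lead := by
  intro cs
  induction cs with
  | nil => intro _ seat _ _ prev lead; rfl
  | cons c rest ih =>
    intro hcs seat h0 h4 prev lead
    have hcne : c ≠ ':' := fun h => hcs (h ▸ List.mem_cons_self ..)
    have hrest : ':' ∉ rest := fun h => hcs (List.mem_cons_of_mem _ h)
    have hb0 : (0:Int) ≤ PySem.Int.mod (seat + 1) 4 := by
      rw [pvMod4]; exact Int.emod_nonneg _ (by norm_num)
    have hb4 : PySem.Int.mod (seat + 1) 4 < 4 := by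
      rw [pvMod4]; exact Int.emod_lt_of_pos _ (by norm_num)
    have hna := pvToStrNoColon seat h0 h4
    have ih' := ih hrest _ hb0 hb4
    by_cases h1 : c = 'D' ∨ c = 'R'
    · have hsplit : ((PySem.Str.split? (PySem.Int.toStr seat ++ String.ofList [c] ++ ":") ":").getD []).getD 1 "" = String.ofList [] := by
        refine pvSplitTok _ ((PySem.Int.toStr seat).toList ++ [c]) [] ?_ ?_ (by simp)
        · simp
        · simp only [List.mem_append, List.mem_singleton]
          rintro (h | h)
          · exact hna h
          · exact hcne h.symm
      have hPc : (c == 'P') = false := by rcases h1 with h | h <;> subst h <;> decide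
      have htok : pvTok c seat lead = [PySem.Int.toStr seat ++ String.ofList [c] ++ ":"] := by
        unfold pvTok; rw [if_pos h1]
      simp only [pvP1, htok, List.cons_append, List.nil_append]
      rw [pvFixCons _ _ _ _ hsplit, if_pos (by simp)]
      rw [hPc]
      simp only [Bool.and_false]
      rw [ih' prev false]
      simp only [strToBidsFwd]
      rw [if_pos h1]
    · by_cases h2 : c = 'P'
      · subst h2
        cases lead
        · have htok : pvTok 'P' seat false = [] := by
            unfold pvTok
            rw [if_neg h1, if_neg (by simp : ¬ ('P' : Char) ≠ 'P'), if_neg (by simp)]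
          simp only [pvP1, htok, List.nil_append, Bool.false_and]
          rw [ih' prev false]
          simp only [strToBidsFwd]
          rw [if_neg h1, if_neg (by simp : ¬ ('P' : Char) ≠ 'P'), if_neg (by simp)]
        · have hsplit : ((PySem.Str.split? (PySem.Int.toStr seat ++ ":P") ":").getD []).getD 1 "" = String.ofList ['P'] := by
            refine pvSplitTok _ (PySem.Int.toStr seat).toList ['P'] ?_ hna (by decide)
            simp [show (":P" : String).toList = [':', 'P'] from by decide]
          have htok : pvTok 'P' seat true = [PySem.Int.toStr seat ++ ":P"] := by
            unfold pvTok
            rw [if_neg h1, if_neg (by simp : ¬ ('P' : Char) ≠ 'P'), if_pos rfl]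
          simp only [pvP1, htok, List.cons_append, List.nil_append, Bool.true_and]
          rw [pvFixCons _ _ _ _ hsplit, if_neg (by simp)]
          rw [show String.ofList ['P'] = "P" from rfl]
          rw [show (('P' : Char) == 'P') = true from by decide]
          rw [ih' "P" true]
          simp only [strToBidsFwd]
          rw [if_neg h1, if_neg (by simp : ¬ ('P' : Char) ≠ 'P'), if_pos trivial]
      · have hsplit : ((PySem.Str.split? (PySem.Int.toStr seat ++ ":" ++ String.ofList [c]) ":").getD []).getD 1 "" = String.ofList [c] := by
          refine pvSplitTok _ (PySem.Int.toStr seat).toList [c] ?_ hna ?_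
          · simp
          · simp only [List.mem_singleton]
            exact fun h => hcne h.symm
        have hPc : (c == 'P') = false := by simp [h2]
        have htok : pvTok c seat lead = [PySem.Int.toStr seat ++ ":" ++ String.ofList [c]] := by
          unfold pvTok; rw [if_neg h1, if_pos (show c ≠ 'P' from h2)]
        simp only [pvP1, htok, List.cons_append, List.nil_append]
        rw [pvFixCons _ _ _ _ hsplit, if_neg (by simp)]
        rw [hPc]
        simp only [Bool.and_false]
        rw [ih' (String.ofList [c]) false]
        simp only [strToBidsFwd]
        rw [if_neg h1, if_pos (show c ≠ 'P' from h2)]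

-- ===== VERDICT (by name: the statement is the Claim_ definition above) =====
theorem str_to_bids_spec : Claim_equal_str_to_bids := by
  unfold Claim_equal_str_to_bids
  intro s _ hpre
  unfold Spec_str_to_bids str_to_bids str_to_bids_alt
  have hpre' : ':' ∉ s.toList := hpre
  by_cases h : s.toList.length = 0
  · have : s.toList = [] := List.length_eq_zero_iff.mp h
    simp [this, strToBidsFwd]
  · have hn : 1 ≤ s.toList.length := by omega
    rw [if_neg h]
    have hb0 : (0:Int) ≤ PySem.Int.mod (4 - (s.toList.length : Int)) 4 := by
      rw [pvMod4]; exact Int.emod_nonneg _ (by norm_num)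
    have hb4 : PySem.Int.mod (4 - (s.toList.length : Int)) 4 < 4 := by
      rw [pvMod4]; exact Int.emod_lt_of_pos _ (by norm_num)
    have hscan := scan_eq_pvP1 s.toList (s.toList.length - 1) (by omega) 3 (by norm_num) (by norm_num)
    have htk : s.toList.length - 1 + 1 = s.toList.length := by omega
    rw [htk, List.take_length] at hscan
    have hseat : ((3:Int) - ((s.toList.length - 1 : Nat) : Int)) % 4
        = PySem.Int.mod (4 - (s.toList.length : Int)) 4 := by
      rw [pvMod4]
      congr 1
      have : ((s.toList.length - 1 : Nat) : Int) = (s.toList.length : Int) - 1 := by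
        push_cast [hn]; ring
      rw [this]; ring
    rw [hscan, hseat]
    exact fix_pvP1 s.toList hpre' _ hb0 hb4 "" true
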